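-- pv_equiv track=rewrite | github.com/GlacyalWolf/programingAlgoritms2 | List2/reGrup3.py | regroup3
-- ===== SOURCE A (Python) =====
-- def regroup3(s):
--     '''
--     >>> regroup('r2b2')
--     'rb22'
--     >>> regroup('a45tr09pw')
--     'atrpw4509'
--     >>> regroup('nonumbers')
--     'nonumbers'
--     >>> regroup('543210')
--     '543210'
--     '''
--
--     stringNum="";
--     stringLett="";
--
--
--     for i in s:
--         if i in "0123456789":
--             stringNum=stringNum+i;
--         else:
--             stringLett=stringLett+i;
--
--     return (stringLett+stringNum);
-- ===== SOURCE B (Python) =====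
-- def regroup3(s):
--     return ''.join(sorted(s, key=lambda c: c in "0123456789"))
-- ===== Notes on version B (the rewrite author's own statement) =====
-- stated objective: idiomatic
-- what changed: Replaces the two-accumulator partition loop with a single stable sort keyed on the boolean digit test; stability keeps each group's original order, so letters (key False) precede digits (key True) exactly as A's concatenation does.
import Mathlib
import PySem

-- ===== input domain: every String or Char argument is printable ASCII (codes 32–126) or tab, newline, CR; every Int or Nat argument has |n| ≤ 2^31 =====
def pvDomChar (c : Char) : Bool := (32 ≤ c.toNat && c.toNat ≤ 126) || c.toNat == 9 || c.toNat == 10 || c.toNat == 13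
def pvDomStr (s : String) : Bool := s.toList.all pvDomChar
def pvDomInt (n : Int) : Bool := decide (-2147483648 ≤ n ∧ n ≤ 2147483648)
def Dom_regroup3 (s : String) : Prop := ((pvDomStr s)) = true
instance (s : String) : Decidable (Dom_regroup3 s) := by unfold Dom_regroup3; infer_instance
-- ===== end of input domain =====

-- B replaces A's two-accumulator partition loop by one stable sort keyed on the digit test (idiomatic).

-- shared digit predicate: Python's `c in "0123456789"` for a single character
def pvIsDig (c : Char) : Bool := "0123456789".toList.contains c

-- ===== PORT A =====
-- for i in s: append i to stringNum or stringLett; return stringLett + stringNum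
def regroup3 (s : String) : String :=
  let r := s.toList.foldl
    (fun (acc : List Char × List Char) i =>
      if pvIsDig i then (acc.1 ++ [i], acc.2) else (acc.1, acc.2 ++ [i]))
    ([], [])
  String.ofList (r.2 ++ r.1)

-- ===== PORT B =====
-- ''.join(sorted(s, key=lambda c: c in "0123456789"))
def regroup3_alt (s : String) : String :=
  String.ofList (PySem.List.sorted s.toList (fun c => pvIsDig c) false)

-- ===== PRECONDITION & SPEC =====
def Spec_regroup3 (s : String) (out : String) : Prop := out = regroup3_alt s
instance (s : String) (out : String) : Decidable (Spec_regroup3 s out) := by unfold Spec_regroup3; infer_instance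

-- ===== CLAIM (what is proved, stated in full; the proofs are below) =====
def Claim_equal_regroup3 : Prop := ∀ (s : String), Dom_regroup3 s → Spec_regroup3 s (regroup3 s)

-- ===== LEMMAS AND PROOFS =====

-- inserting x after a prefix it does not go before, and before a suffix whose head it goes before
lemma insertBy_skip_prefix {α : Type} (before : α → α → Bool) (x : α) (L D : List α)
    (hL : ∀ y ∈ L, before x y = false)
    (hD : ∀ d t, D = d :: t → before x d = true) :
    PySem.List.insertBy before x (L ++ D) = L ++ x :: D := by
  induction L with
  | nil =>
      cases D with
      | nil => simp [PySem.List.insertBy]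
      | cons d t => simp [PySem.List.insertBy, hD d t rfl]
  | cons y L ih =>
      have hy : before x y = false := hL y (by simp)
      simp only [List.cons_append, PySem.List.insertBy, hy]
      simp [ih (fun z hz => hL z (by simp [hz]))]

-- the insertion-sort fold with a Bool key keeps the accumulator partitioned
lemma sorted_fold_partition (cs : List Char) (L D : List Char)
    (hL : ∀ y ∈ L, pvIsDig y = false) (hD : ∀ y ∈ D, pvIsDig y = true) :
    cs.foldl (fun acc x =>
        PySem.List.insertBy (fun a b => decide (pvIsDig a < pvIsDig b)) x acc) (L ++ D)
      = (L ++ cs.filter (fun c => !pvIsDig c)) ++ (D ++ cs.filter pvIsDig) := by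
  induction cs generalizing L D with
  | nil => simp
  | cons c cs ih =>
      by_cases hc : pvIsDig c = true
      · have h1 : PySem.List.insertBy (fun a b => decide (pvIsDig a < pvIsDig b)) c (L ++ D)
            = (L ++ D) ++ [c] := by
          apply PySem.List.insertBy_of_forall_not_before
          intro y _
          simp [hc]
        have hD' : ∀ y ∈ D ++ [c], pvIsDig y = true := by
          intro y hy
          rcases List.mem_append.mp hy with h | h
          · exact hD y h
          · simp at h; simpa [h] using hc
        have h2 := ih L (D ++ [c]) hL hD'
        simp only [List.foldl_cons, h1, List.append_assoc] at h2 ⊢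
        simp [h2, List.filter_cons, hc]
      · have hc' : pvIsDig c = false := by simpa using hc
        have h1 : PySem.List.insertBy (fun a b => decide (pvIsDig a < pvIsDig b)) c (L ++ D)
            = L ++ c :: D := by
          apply insertBy_skip_prefix
          · intro y hy; simp [hc', hL y hy]
          · intro d t hdt; simp [hc', hD d (by simp [hdt])]
        have hL' : ∀ y ∈ L ++ [c], pvIsDig y = false := by
          intro y hy
          rcases List.mem_append.mp hy with h | h
          · exact hL y h
          · simp at h; simpa [h] using hc'
        have h2 := ih (L ++ [c]) D hL' hD
        simp only [List.foldl_cons, h1]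
        have : L ++ c :: D = (L ++ [c]) ++ D := by simp
        rw [this, h2]
        simp [List.filter_cons, hc']

-- the stable sort with the digit key is letters-then-digits, each in original order
lemma sorted_digit_key (cs : List Char) :
    PySem.List.sorted cs (fun c => pvIsDig c) false
      = cs.filter (fun c => !pvIsDig c) ++ cs.filter pvIsDig := by
  have h := sorted_fold_partition cs [] [] (by simp) (by simp)
  simpa [PySem.List.sorted] using h

-- A's loop accumulates the two filtered subsequences
lemma a_fold_partition (cs : List Char) (n l : List Char) :
    cs.foldl (fun (acc : List Char × List Char) i =>
        if pvIsDig i then (acc.1 ++ [i], acc.2) else (acc.1, acc.2 ++ [i])) (n, l)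
      = (n ++ cs.filter pvIsDig, l ++ cs.filter (fun c => !pvIsDig c)) := by
  induction cs generalizing n l with
  | nil => simp
  | cons c cs ih =>
      by_cases hc : pvIsDig c = true
      · simp [List.foldl_cons, hc, ih, List.filter_cons]
      · have hc' : pvIsDig c = false := by simpa using hc
        simp [List.foldl_cons, hc', ih, List.filter_cons]

-- ===== VERDICT (by name: the statement is the Claim_ definition above) =====
theorem regroup3_spec : Claim_equal_regroup3 := by
  intro s _
  unfold Spec_regroup3 regroup3 regroup3_alt
  rw [sorted_digit_key, a_fold_partition]
  simp
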